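-- pv_equiv track=rewrite | github.com/harjassand/AGI-Stack-Unchained | CDEL-v2/cdel/v1_5r/campaign/compile_rsi_real_families.py | _alpha_ok
-- ===== SOURCE A (Python) =====
-- def _alpha_ok(barriers: list[int], alpha_num: int, alpha_den: int, k_accel: int) -> bool:
--     if len(barriers) < 2 or k_accel <= 0:
--         return False
--     streak = 0
--     for idx in range(len(barriers) - 1):
--         prev_val = barriers[idx]
--         next_val = barriers[idx + 1]
--         if next_val * alpha_den <= prev_val * alpha_num:
--             streak += 1
--         else:
--             streak = 0
--         if streak >= k_accel:
--             return True
--     return False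
-- ===== SOURCE B (Python) =====
-- def _alpha_ok(barriers: list[int], alpha_num: int, alpha_den: int, k_accel: int) -> bool:
--     n = len(barriers)
--     if n < 2 or k_accel <= 0:
--         return False
--     # brute-force sliding windows: some window of k_accel consecutive steps is all non-increasing
--     return any(
--         all(barriers[j + 1] * alpha_den <= barriers[j] * alpha_num
--             for j in range(i, i + k_accel))
--         for i in range(n - k_accel)
--     )
-- ===== Notes on version B (the rewrite author's own statement) =====
-- stated objective: alternative
-- what changed: Replaces A's single-pass streak counter with a brute-force sliding-window search: for every window start i it re-checks all k_accel consecutive ratio steps with an inner all(), accepting if any window passes; O(n*k) instead of O(n).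
import Mathlib
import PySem

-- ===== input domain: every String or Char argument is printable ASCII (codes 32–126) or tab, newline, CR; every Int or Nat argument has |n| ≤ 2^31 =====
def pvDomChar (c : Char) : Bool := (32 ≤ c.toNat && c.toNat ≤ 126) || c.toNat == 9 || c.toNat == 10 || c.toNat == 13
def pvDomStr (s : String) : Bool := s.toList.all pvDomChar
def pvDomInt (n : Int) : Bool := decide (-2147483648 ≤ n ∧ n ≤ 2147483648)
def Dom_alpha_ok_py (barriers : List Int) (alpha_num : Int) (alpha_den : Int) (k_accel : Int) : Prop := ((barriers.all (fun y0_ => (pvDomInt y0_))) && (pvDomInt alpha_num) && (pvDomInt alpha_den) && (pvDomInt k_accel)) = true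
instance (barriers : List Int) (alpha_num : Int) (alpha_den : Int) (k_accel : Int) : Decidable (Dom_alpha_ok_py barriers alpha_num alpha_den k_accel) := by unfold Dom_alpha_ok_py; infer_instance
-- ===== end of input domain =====

-- B replaces A's single-pass streak counter by a brute-force sliding-window search (any window of k_accel consecutive non-increasing steps); return values proved equal on all inputs.

-- ===== PORT A =====
-- the for-loop over range(len(barriers)-1): index list, streak accumulator, early return on streak >= k_accel
def alphaLoopA (barriers : List Int) (alpha_num alpha_den k_accel : Int) : List Nat → Int → Bool
  | [], _ => false
  | idx :: rest, streak =>
    let prev_val := barriers.getD idx 0       -- idx is drawn from range(len-1), always in range, so plain Python indexing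
    let next_val := barriers.getD (idx + 1) 0
    let streak' := if next_val * alpha_den ≤ prev_val * alpha_num then streak + 1 else (0 : Int)
    if k_accel ≤ streak' then true else alphaLoopA barriers alpha_num alpha_den k_accel rest streak'

def alpha_ok_py (barriers : List Int) (alpha_num : Int) (alpha_den : Int) (k_accel : Int) : Bool :=
  if barriers.length < 2 || k_accel ≤ 0 then false
  else alphaLoopA barriers alpha_num alpha_den k_accel (List.range (barriers.length - 1)) 0

-- ===== PORT B =====
-- any(...) over window starts i in range(n - k_accel); all(...) over j in range(i, i + k_accel)
def alpha_ok_py_alt (barriers : List Int) (alpha_num : Int) (alpha_den : Int) (k_accel : Int) : Bool :=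
  let n := barriers.length
  if n < 2 || k_accel ≤ 0 then false
  else (List.range (n - k_accel.toNat)).any (fun i =>
    (List.range' i k_accel.toNat).all (fun j =>
      decide (barriers.getD (j + 1) 0 * alpha_den ≤ barriers.getD j 0 * alpha_num)))

-- ===== PRECONDITION & SPEC =====
def Spec_alpha_ok_py (barriers : List Int) (alpha_num : Int) (alpha_den : Int) (k_accel : Int) (out : Bool) : Prop := out = alpha_ok_py_alt barriers alpha_num alpha_den k_accel
instance (barriers : List Int) (alpha_num : Int) (alpha_den : Int) (k_accel : Int) (out : Bool) : Decidable (Spec_alpha_ok_py barriers alpha_num alpha_den k_accel out) := by unfold Spec_alpha_ok_py; infer_instance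

-- ===== CLAIM (what is proved, stated in full; the proofs are below) =====
def Claim_equal_alpha_ok_py : Prop := ∀ (barriers : List Int) (alpha_num : Int) (alpha_den : Int) (k_accel : Int), Dom_alpha_ok_py barriers alpha_num alpha_den k_accel → Spec_alpha_ok_py barriers alpha_num alpha_den k_accel (alpha_ok_py barriers alpha_num alpha_den k_accel)

-- ===== LEMMAS AND PROOFS =====

-- A's loop re-expressed over the list of comparison flags (proof-only abstraction)
def flagLoop (k_accel : Int) : List Bool → Int → Bool
  | [], _ => false
  | f :: fs, streak =>
    let streak' := if f then streak + 1 else (0 : Int)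
    if k_accel ≤ streak' then true else flagLoop k_accel fs streak'

-- "some window of kn consecutive flags is all true"
def Wwin (kn : Nat) (fs : List Bool) : Prop :=
  ∃ i, i + kn ≤ fs.length ∧ ∀ j < kn, fs.getD (i + j) false = true

-- "a prefix run of m trues with k ≤ c + m"
def PrefRun (k c : Int) (fs : List Bool) : Prop :=
  ∃ m : Nat, m ≤ fs.length ∧ k ≤ c + m ∧ ∀ j < m, fs.getD j false = true

theorem prefRun_imp_win (k : Int) (hk : 0 < k) (fs : List Bool)
    (h : PrefRun k 0 fs) : Wwin k.toNat fs := by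
  obtain ⟨m, hm, hkm, hall⟩ := h
  refine ⟨0, ?_, fun j hj => ?_⟩
  · omega
  · rw [Nat.zero_add]; exact hall j (by omega)

theorem flagLoop_iff (k : Int) (hk : 0 < k) :
    ∀ (fs : List Bool) (s : Int), 0 ≤ s → s < k →
      (flagLoop k fs s = true ↔ (PrefRun k s fs ∨ Wwin k.toNat fs)) := by
  intro fs
  induction fs with
  | nil =>
    intro s hs0 hsk
    simp only [flagLoop, Bool.false_eq_true, false_iff]
    rintro (⟨m, hm, hkm, _⟩ | ⟨i, hi, _⟩)
    · simp at hm; omega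
    · simp at hi; omega
  | cons f fs ih =>
    intro s hs0 hsk
    cases f with
    | true =>
      by_cases hk1 : k ≤ s + 1
      · simp only [flagLoop, if_true, if_pos hk1, true_iff]
        left
        exact ⟨1, by simp, by push_cast; omega, fun j hj => by
          interval_cases j; simp⟩
      · simp only [flagLoop, if_true, if_neg hk1]
        rw [ih (s + 1) (by omega) (by omega)]
        constructor
        · rintro (⟨m, hm, hkm, hall⟩ | ⟨i, hi, hall⟩)
          · left
            exact ⟨m + 1, by simpa using hm, by push_cast at hkm ⊢; omega,
              fun j hj => by
                cases j with
                | zero => simp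
                | succ j' => simpa using hall j' (by omega)⟩
          · right
            exact ⟨i + 1, by simp; omega, fun j hj => by
              simpa [Nat.add_right_comm] using hall j hj⟩
        · rintro (⟨m, hm, hkm, hall⟩ | ⟨i, hi, hall⟩)
          · cases m with
            | zero => exfalso; push_cast at hkm; omega
            | succ m' =>
              left
              exact ⟨m', by simpa using hm, by push_cast at hkm ⊢; omega,
                fun j hj => by simpa using hall (j + 1) (by omega)⟩
          · cases i with
            | zero =>
              left
              refine ⟨k.toNat - 1, ?_, by omega, fun j hj => ?_⟩
              · simp at hi ⊢; omega
              · simpa using hall (j + 1) (by omega)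
            | succ i' =>
              right
              exact ⟨i', by simp at hi; omega, fun j hj => by
                simpa [Nat.add_right_comm] using hall j hj⟩
    | false =>
      have h0 : ¬ k ≤ (0 : Int) := by omega
      simp only [flagLoop, Bool.false_eq_true, if_false, if_neg h0]
      rw [ih 0 le_rfl hk]
      constructor
      · rintro (hp | ⟨i, hi, hall⟩)
        · right
          obtain ⟨i, hi, hall⟩ := prefRun_imp_win k hk fs hp
          exact ⟨i + 1, by simp; omega, fun j hj => by
            simpa [Nat.add_right_comm] using hall j hj⟩
        · right
          exact ⟨i + 1, by simp; omega, fun j hj => by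
            simpa [Nat.add_right_comm] using hall j hj⟩
      · rintro (⟨m, hm, hkm, hall⟩ | ⟨i, hi, hall⟩)
        · cases m with
          | zero => exfalso; push_cast at hkm; omega
          | succ m' => exfalso; simpa using hall 0 (by omega)
        · cases i with
          | zero =>
            exfalso
            simpa using hall 0 (by omega)
          | succ i' =>
            right
            exact ⟨i', by simp at hi; omega, fun j hj => by
              simpa [Nat.add_right_comm] using hall j hj⟩

-- A's loop over range = flagLoop over the pairwise flags
theorem alphaLoopA_eq_flagLoop (barriers : List Int) (an ad k : Int)
    (flags : List Bool)
    (hf : flags = List.zipWith (fun prev nxt => decide (nxt * ad ≤ prev * an)) barriers barriers.tail) :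
    ∀ (m i : Nat), i + m = flags.length → ∀ s : Int,
      alphaLoopA barriers an ad k (List.range' i m) s = flagLoop k (flags.drop i) s := by
  have hflen : flags.length = min barriers.length barriers.tail.length := by
    rw [hf]; exact List.length_zipWith ..
  intro m
  induction m with
  | zero =>
    intro i hi s
    have h : flags.drop i = [] := List.drop_of_length_le (by omega)
    simp [h, alphaLoopA, flagLoop]
  | succ m ih =>
    intro i hi s
    have ht : barriers.tail.length = barriers.length - 1 := List.length_tail
    have hi' : i < flags.length := by omega
    have hib : i < barriers.length := by omega
    have hib1 : i + 1 < barriers.length := by omega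
    have hdrop : flags.drop i = flags[i] :: flags.drop (i + 1) :=
      List.drop_eq_getElem_cons hi'
    have hflag : flags[i] = decide (barriers[i + 1]'hib1 * ad ≤ barriers[i]'hib * an) := by
      subst hf
      rw [List.getElem_zipWith]
      congr 1
      rw [List.getElem_tail]
    rw [List.range'_succ, hdrop]
    simp only [alphaLoopA, flagLoop, hflag, decide_eq_true_eq]
    rw [List.getD_eq_getElem _ _ hib, List.getD_eq_getElem _ _ hib1]
    by_cases hC : barriers[i + 1]'hib1 * ad ≤ barriers[i]'hib * an
    · simp only [if_pos hC]
      split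
      · rfl
      · exact ih (i + 1) (by omega) (s + 1)
    · simp only [if_neg hC]
      split
      · rfl
      · exact ih (i + 1) (by omega) 0

-- B's window search = Wwin on the flags
theorem alt_windows_iff (barriers : List Int) (an ad k : Int) (hk : 0 < k)
    (h2 : 2 ≤ barriers.length)
    (flags : List Bool)
    (hf : flags = List.zipWith (fun prev nxt => decide (nxt * ad ≤ prev * an)) barriers barriers.tail) :
    ((List.range (barriers.length - k.toNat)).any (fun i =>
        (List.range' i k.toNat).all (fun j =>
          decide (barriers.getD (j + 1) 0 * ad ≤ barriers.getD j 0 * an))) = true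
      ↔ Wwin k.toNat flags) := by
  have hflen : flags.length = barriers.length - 1 := by
    rw [hf, List.length_zipWith, List.length_tail]; omega
  have hget : ∀ j, j < flags.length →
      (flags.getD j false = decide (barriers.getD (j + 1) 0 * ad ≤ barriers.getD j 0 * an)) := by
    intro j hj
    have hjb : j < barriers.length := by omega
    have hjb1 : j + 1 < barriers.length := by omega
    have hjt : j < barriers.tail.length := by
      rw [List.length_tail]; omega
    rw [List.getD_eq_getElem _ _ hj, List.getD_eq_getElem _ _ hjb, List.getD_eq_getElem _ _ hjb1]
    subst hf
    rw [List.getElem_zipWith]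
    congr 1
    rw [List.getElem_tail]
  rw [List.any_eq_true]
  constructor
  · rintro ⟨i, hi, hall⟩
    rw [List.mem_range] at hi
    rw [List.all_eq_true] at hall
    refine ⟨i, by omega, fun j hj => ?_⟩
    have hmem : i + j ∈ List.range' i k.toNat := by
      rw [List.mem_range'_1]; omega
    have := hall _ hmem
    rw [hget (i + j) (by omega)]
    exact this
  · rintro ⟨i, hi, hall⟩
    refine ⟨i, ?_, ?_⟩
    · rw [List.mem_range]; omega
    · rw [List.all_eq_true]
      intro j hj
      rw [List.mem_range'_1] at hj
      have := hall (j - i) (by omega)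
      rw [hget (i + (j - i)) (by omega)] at this
      have hji : i + (j - i) = j := by omega
      rw [hji] at this
      exact this

-- ===== VERDICT (by name: the statement is the Claim_ definition above) =====
theorem alpha_ok_py_spec : Claim_equal_alpha_ok_py := by
  intro barriers an ad k _
  unfold Spec_alpha_ok_py alpha_ok_py alpha_ok_py_alt
  by_cases hg : (decide (barriers.length < 2) || decide (k ≤ 0)) = true
  · rw [if_pos hg, if_pos hg]
  · rw [if_neg hg, if_neg hg]
    simp only [Bool.or_eq_true, decide_eq_true_eq, not_or, not_lt, not_le] at hg
    obtain ⟨hb2, hk⟩ := hg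
    set flags := List.zipWith (fun prev nxt => decide (nxt * ad ≤ prev * an)) barriers barriers.tail with hf
    have hflen : flags.length = barriers.length - 1 := by
      rw [hf, List.length_zipWith, List.length_tail]; omega
    have h1 : List.range (barriers.length - 1) = List.range' 0 flags.length := by
      rw [hflen, List.range_eq_range']
    rw [h1, alphaLoopA_eq_flagLoop barriers an ad k flags hf flags.length 0 (by omega) 0,
      List.drop_zero]
    have hA := flagLoop_iff k hk flags 0 le_rfl hk
    have hB := alt_windows_iff barriers an ad k hk hb2 flags hf
    have hPW : PrefRun k 0 flags ∨ Wwin k.toNat flags ↔ Wwin k.toNat flags := by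
      constructor
      · rintro (hp | hw)
        · exact prefRun_imp_win k hk flags hp
        · exact hw
      · exact Or.inr
    rw [hPW] at hA
    rw [Bool.eq_iff_iff, hA, hB]
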